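-- pv_equiv track=rewrite | github.com/Duperopope/wakfu-optimizer | engine/orientation.py | turn_to_face
-- ===== SOURCE A (Python) =====
-- DIRECTIONS = {
--     "N": (0, -1),   # Nord = regarde vers le haut
--     "S": (0, 1),    # Sud = regarde vers le bas
--     "E": (1, 0),    # Est = regarde vers la droite
--     "W": (-1, 0),   # Ouest = regarde vers la gauche
-- }
--
-- def get_direction_vector(from_pos, to_pos):
--     """
--     Retourne le vecteur direction normalise de from_pos vers to_pos.
--     Utilise le composant dominant (Manhattan) pour determiner la direction cardinale.
--
--     Args:
--         from_pos: tuple (x, y) position source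
--         to_pos: tuple (x, y) position destination
--
--     Returns:
--         tuple (dx, dy) direction normalisee, ou (0, 0) si meme case
--     """
--     dx = to_pos[0] - from_pos[0]
--     dy = to_pos[1] - from_pos[1]
--
--     if dx == 0 and dy == 0:
--         return (0, 0)
--
--     # On prend le composant dominant
--     if abs(dx) >= abs(dy):
--         return (1 if dx > 0 else -1, 0)
--     else:
--         return (0, 1 if dy > 0 else -1)
--
-- def turn_to_face(fighter_pos, target_pos):
--     """
--     Calcule la nouvelle direction pour qu'un combattant fasse face a une cible.
--     Utilise lors du lancement de sort ou du deplacement.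
--
--     Args:
--         fighter_pos: tuple (x, y) - position du combattant
--         target_pos: tuple (x, y) - position de la cible
--
--     Returns:
--         str - nouvelle direction ("N", "S", "E", "W") ou None si meme case
--     """
--     if fighter_pos == target_pos:
--         return None
--
--     direction_vec = get_direction_vector(fighter_pos, target_pos)
--
--     # Trouver la direction cardinale correspondante
--     for dir_name, dir_vec in DIRECTIONS.items():
--         if direction_vec == dir_vec:
--             return dir_name
--
--     return None  # Ne devrait pas arriver
-- ===== SOURCE B (Python) =====
-- def turn_to_face(fighter_pos, target_pos):
--     if fighter_pos == target_pos:
--         return None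
--     dx = target_pos[0] - fighter_pos[0]
--     dy = target_pos[1] - fighter_pos[1]
--     # argmax of dot product of (dx, dy) with each cardinal unit vector;
--     # horizontal candidates listed first so ties go E/W like A's >= test
--     best_name, best_score = "E", dx
--     for name, score in (("W", -dx), ("N", -dy), ("S", dy)):
--         if score > best_score:
--             best_name, best_score = name, score
--     return best_name
-- ===== Notes on version B (the rewrite author's own statement) =====
-- stated objective: alternative
-- what changed: Replaces A's dominant-component test (abs comparison, normalized vector, DIRECTIONS table scan) with an argmax loop that scores each cardinal direction by its dot product with the delta and keeps the first maximum.
import Mathlib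
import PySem

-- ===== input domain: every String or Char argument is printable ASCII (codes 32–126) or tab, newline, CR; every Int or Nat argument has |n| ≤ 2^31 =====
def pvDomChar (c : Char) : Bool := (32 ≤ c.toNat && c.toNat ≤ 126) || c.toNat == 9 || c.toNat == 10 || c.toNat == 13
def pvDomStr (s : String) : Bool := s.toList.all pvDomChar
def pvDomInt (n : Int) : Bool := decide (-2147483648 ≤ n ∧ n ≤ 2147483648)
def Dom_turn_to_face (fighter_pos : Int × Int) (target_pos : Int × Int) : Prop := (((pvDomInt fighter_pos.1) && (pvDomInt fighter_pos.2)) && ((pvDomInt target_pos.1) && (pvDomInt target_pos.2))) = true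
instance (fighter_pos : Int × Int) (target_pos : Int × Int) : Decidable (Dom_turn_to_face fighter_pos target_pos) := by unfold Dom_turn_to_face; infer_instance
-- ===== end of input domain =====

-- ===== PORT A =====
-- B replaces A's abs-based dominant-axis test + DIRECTIONS table scan by a first-argmax
-- loop over dot-product scores of the four cardinal directions; behaviour unchanged.
def pyDIRECTIONS : List (String × (Int × Int)) :=
  [("N", (0, -1)), ("S", (0, 1)), ("E", (1, 0)), ("W", (-1, 0))]

def get_direction_vector (from_pos to_pos : Int × Int) : Int × Int :=
  let dx := to_pos.1 - from_pos.1
  let dy := to_pos.2 - from_pos.2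
  if dx = 0 ∧ dy = 0 then (0, 0)
  else if |dx| ≥ |dy| then ((if dx > 0 then 1 else -1), 0)
  else (0, (if dy > 0 then 1 else -1))

def scanDirs (direction_vec : Int × Int) : List (String × (Int × Int)) → Option String
  | [] => none
  | (dir_name, dir_vec) :: rest =>
      if direction_vec = dir_vec then some dir_name else scanDirs direction_vec rest

def turn_to_face (fighter_pos : Int × Int) (target_pos : Int × Int) : Option String :=
  if fighter_pos = target_pos then none
  else scanDirs (get_direction_vector fighter_pos target_pos) pyDIRECTIONS

-- ===== PORT B =====
-- explicit first-argmax loop, as in Source B (keep current best unless strictly greater)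
def bestDir : (String × Int) → List (String × Int) → String
  | (n, _), [] => n
  | (n, v), (n2, v2) :: rest =>
      if v2 > v then bestDir (n2, v2) rest else bestDir (n, v) rest

def turn_to_face_alt (fighter_pos : Int × Int) (target_pos : Int × Int) : Option String :=
  if fighter_pos = target_pos then none
  else
    let dx := target_pos.1 - fighter_pos.1
    let dy := target_pos.2 - fighter_pos.2
    some (bestDir ("E", dx) [("W", -dx), ("N", -dy), ("S", dy)])

-- ===== PRECONDITION & SPEC =====
def Spec_turn_to_face (fighter_pos : Int × Int) (target_pos : Int × Int) (out : Option String) : Prop := out = turn_to_face_alt fighter_pos target_pos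
instance (fighter_pos : Int × Int) (target_pos : Int × Int) (out : Option String) : Decidable (Spec_turn_to_face fighter_pos target_pos out) := by unfold Spec_turn_to_face; infer_instance

-- ===== CLAIM =====
def Claim_equal_turn_to_face : Prop := ∀ (fighter_pos : Int × Int) (target_pos : Int × Int), Dom_turn_to_face fighter_pos target_pos → Spec_turn_to_face fighter_pos target_pos (turn_to_face fighter_pos target_pos)

-- ===== LEMMAS AND PROOFS =====

-- ===== VERDICT =====
set_option maxHeartbeats 1600000 in
theorem turn_to_face_spec : Claim_equal_turn_to_face := by
  intro fp tp _
  unfold Spec_turn_to_face turn_to_face turn_to_face_alt get_direction_vector pyDIRECTIONS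
  obtain ⟨fx, fy⟩ := fp
  obtain ⟨tx, ty⟩ := tp
  by_cases hsame : (fx, fy) = (tx, ty)
  · simp [hsame]
  · simp only [if_neg hsame]
    simp only [scanDirs, bestDir]
    have hne : ¬ (tx - fx = 0 ∧ ty - fy = 0) := by
      intro ⟨h1, h2⟩
      exact hsame (by simp only [Prod.mk.injEq]; omega)
    rcases abs_cases (tx - fx) with ⟨hx1, hx2⟩ | ⟨hx1, hx2⟩ <;>
      rcases abs_cases (ty - fy) with ⟨hy1, hy2⟩ | ⟨hy1, hy2⟩ <;>
      split_ifs <;>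
      first
        | rfl
        | omega
        | (exact absurd rfl (by assumption))
        | (exfalso; simp only [Prod.mk.injEq] at * <;> omega)
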